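-- pv_equiv track=rewrite | github.com/raulk/eth-protocol-expert | src/ingestion/erc_loader.py | _is_erc
-- ===== SOURCE A (Python) =====
-- def _is_erc(content: str) -> bool:
--     """Check if content has category: ERC in frontmatter."""
--     lines = content.split("\n")
--     in_frontmatter = False
--
--     for line in lines:
--         stripped = line.strip()
--         if stripped == "---":
--             if in_frontmatter:
--                 break
--             in_frontmatter = True
--             continue
--
--         if in_frontmatter and stripped.lower().startswith("category:"):
--             category = stripped.split(":", 1)[1].strip().lower()
--             return category == "erc"
--
--     return False
-- ===== SOURCE B (Python) =====
-- def _is_erc(content: str) -> bool: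
--     """Check if content has category: ERC in frontmatter."""
--     stripped = [line.strip() for line in content.split("\n")]
--     if "---" not in stripped:
--         return False
--     after = stripped[stripped.index("---") + 1:]
--     end = after.index("---") if "---" in after else len(after)
--     region = after[:end]
--     cats = [s for s in region if s.lower().startswith("category:")]
--     return bool(cats) and cats[0].split(":", 1)[1].strip().lower() == "erc"
-- ===== Notes on version B (the rewrite author's own statement) =====
-- stated objective: alternative
-- what changed: Replaces A's flag-driven early-return loop by a loop-free staged pipeline: strip all lines, delimit the frontmatter region by the indices of the first and second '---' (EOF if absent), filter the region for category lines, and test only the first of them.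
import Mathlib
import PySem

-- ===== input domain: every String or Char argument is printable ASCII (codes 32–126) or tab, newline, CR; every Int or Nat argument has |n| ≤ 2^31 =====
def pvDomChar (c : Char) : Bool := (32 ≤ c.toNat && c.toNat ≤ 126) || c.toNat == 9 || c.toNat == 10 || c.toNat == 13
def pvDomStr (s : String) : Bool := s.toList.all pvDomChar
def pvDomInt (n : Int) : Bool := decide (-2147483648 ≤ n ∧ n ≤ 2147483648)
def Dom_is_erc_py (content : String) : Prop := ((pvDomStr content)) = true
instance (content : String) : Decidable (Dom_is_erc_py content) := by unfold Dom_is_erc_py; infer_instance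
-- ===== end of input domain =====

-- B replaces A's flag-driven early-return loop by a loop-free staged pipeline (strip, slice the
-- region between the first and second '---', filter for category lines, test the first); same behaviour.

-- ===== PORT A =====
-- the category-line check: stripped.split(":", 1)[1].strip().lower() == "erc"
-- (the line starts with "category:", so the split always yields two parts; the fallback arm is unreachable)
def ercCategoryCheck (stripped : String) : Bool :=
  match PySem.Str.splitMax? stripped ":" 1 with
  | some (_ :: c :: _) => PySem.Str.lower (PySem.Str.strip c) == "erc"
  | _ => false

-- A's loop over the lines, carrying the in_frontmatter flag
def ercLoopA : List String → Bool → Bool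
  | [], _ => false
  | line :: rest, inF =>
    let stripped := PySem.Str.strip line
    if stripped == "---" then
      if inF then false else ercLoopA rest true
    else if inF && PySem.Str.startswith (PySem.Str.lower stripped) "category:" then
      ercCategoryCheck stripped
    else ercLoopA rest inF

def is_erc_py (content : String) : Bool :=
  ercLoopA ((PySem.Str.split? content "\n").getD []) false

-- ===== PORT B =====
def is_erc_py_alt (content : String) : Bool :=
  let stripped := ((PySem.Str.split? content "\n").getD []).map PySem.Str.strip
  match PySem.List.index? stripped "---" with
  | none => false
  | some i =>
    let after := stripped.drop (i + 1)
    let e := (PySem.List.index? after "---").getD after.length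
    let region := after.take e
    let cats := region.filter (fun s => PySem.Str.startswith (PySem.Str.lower s) "category:")
    match cats with
    | [] => false
    | c :: _ => ercCategoryCheck c

-- ===== PRECONDITION & SPEC =====
def Spec_is_erc_py (content : String) (out : Bool) : Prop := out = is_erc_py_alt content
instance (content : String) (out : Bool) : Decidable (Spec_is_erc_py content out) := by unfold Spec_is_erc_py; infer_instance

-- ===== CLAIM (what is proved, stated in full; the proofs are below) =====
def Claim_equal_is_erc_py : Prop := ∀ (content : String), Dom_is_erc_py content → Spec_is_erc_py content (is_erc_py content)

-- ===== LEMMAS AND PROOFS =====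

-- B's region evaluation on a list of already-stripped lines (proof-side abbreviation)
def ercRegionEval (xs : List String) : Bool :=
  let e := (PySem.List.index? xs "---").getD xs.length
  match (xs.take e).filter (fun s => PySem.Str.startswith (PySem.Str.lower s) "category:") with
  | [] => false
  | c :: _ => ercCategoryCheck c

-- (o.map (+1)).getD (n+1) successor-commutes with getD
theorem ercOptSucc (o : Option Nat) (n : Nat) : (o.map (· + 1)).getD (n + 1) = o.getD n + 1 := by
  cases o <;> rfl

-- With the flag set, A's loop computes B's region evaluation of the stripped lines.
theorem ercLoopA_true_eq (lines : List String) :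
    ercLoopA lines true = ercRegionEval (lines.map PySem.Str.strip) := by
  induction lines with
  | nil => rfl
  | cons l rest ih =>
    by_cases h : PySem.Str.strip l = "---"
    · simp only [ercLoopA, List.map_cons, h, ercRegionEval]
      rw [PySem.List.index?_cons_self]
      simp
    · simp only [ercLoopA, List.map_cons, ercRegionEval, Bool.true_and, List.length_cons]
      rw [if_neg (by simp [h]), PySem.List.index?_cons_of_ne _ h, ercOptSucc,
        List.take_succ_cons, List.filter_cons]
      split_ifs with hp
      · rfl
      · rw [ih]; rfl

-- With the flag clear, A's loop finds the first stripped '---' and then region-evaluates after it.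
theorem ercLoopA_false_eq (lines : List String) :
    ercLoopA lines false =
      (match PySem.List.index? (lines.map PySem.Str.strip) "---" with
       | none => false
       | some i => ercRegionEval ((lines.map PySem.Str.strip).drop (i + 1))) := by
  induction lines with
  | nil => rfl
  | cons l rest ih =>
    by_cases h : PySem.Str.strip l = "---"
    · simp only [ercLoopA, List.map_cons, h]
      rw [PySem.List.index?_cons_self]
      simp [ercLoopA_true_eq]
    · simp only [ercLoopA, List.map_cons, Bool.false_and]
      rw [if_neg (by simp [h]), if_neg (by simp), PySem.List.index?_cons_of_ne _ h, ih]
      cases PySem.List.index? (rest.map PySem.Str.strip) "---" <;> simp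

-- ===== VERDICT (by name: the statement is the Claim_ definition above) =====
theorem is_erc_py_spec : Claim_equal_is_erc_py := by
  intro content _
  unfold Spec_is_erc_py is_erc_py is_erc_py_alt
  rw [ercLoopA_false_eq]
  cases h : PySem.List.index? (((PySem.Str.split? content "\n").getD []).map PySem.Str.strip) "---" <;>
    simp only [h, ercRegionEval]
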